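-- pv_equiv track=rewrite | github.com/green339/coding_test | Programmers/컨트롤 제트.py | solution
-- ===== SOURCE A (Python) =====
-- def solution(s):
--     stack = []
--     for i in s.split():
--         if i == "Z":
--             if stack:
--                 stack.pop()
--         else:
--             stack.append(int(i))
--     return sum(stack)
-- ===== SOURCE B (Python) =====
-- def solution(s):
--     skip = 0
--     total = 0
--     for tok in reversed(s.split()):
--         if tok == "Z":
--             skip += 1
--         else:
--             v = int(tok)
--             if skip > 0:
--                 skip -= 1
--             else:
--                 total += v
--     return total
-- ===== Notes on version B (the rewrite author's own statement) =====
-- stated objective: alternative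
-- what changed: Replaces the explicit stack (append/pop then sum) by a single reverse pass keeping only an integer skip counter and a running total; the LIFO undo pairing is recovered by the counter.
import Mathlib
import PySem

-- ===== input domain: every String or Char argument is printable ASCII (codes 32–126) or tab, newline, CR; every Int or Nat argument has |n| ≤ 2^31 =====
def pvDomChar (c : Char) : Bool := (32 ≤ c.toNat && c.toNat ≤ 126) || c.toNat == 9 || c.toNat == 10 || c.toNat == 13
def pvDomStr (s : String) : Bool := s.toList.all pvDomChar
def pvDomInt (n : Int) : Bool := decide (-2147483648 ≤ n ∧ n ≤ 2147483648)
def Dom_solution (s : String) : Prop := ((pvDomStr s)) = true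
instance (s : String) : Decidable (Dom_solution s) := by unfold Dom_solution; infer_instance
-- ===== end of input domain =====

-- B changes the decomposition: no stack, one reverse pass with a skip counter and a running total.

-- ===== PORT A =====
-- stack.append at the end, 'Z' pops the last element (no-op on empty = dropLast []); int(i) is
-- exact via PySem.Int.ofStr? — tokens where it is none raise ValueError in Python, excluded by Pre_.
def solution (s : String) : Int :=
  ((PySem.Str.split₀ s).foldl
    (fun (stack : List Int) i =>
      if i == "Z" then stack.dropLast
      else stack ++ [(PySem.Int.ofStr? i).getD 0])
    []).sum

-- ===== PORT B =====
def solution_alt (s : String) : Int :=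
  ((PySem.Str.split₀ s).reverse.foldl
    (fun (st : Int × Int) tok =>
      if tok == "Z" then (st.1 + 1, st.2)
      else
        let v := (PySem.Int.ofStr? tok).getD 0
        if st.1 > 0 then (st.1 - 1, st.2) else (st.1, st.2 + v))
    (0, 0)).2

-- ===== PRECONDITION & SPEC =====
-- Pre_ excludes exactly the inputs where Python's int(i) raises ValueError (a non-"Z" token
-- that is not an int literal); A raises there, so nothing is claimed.
def Pre_solution (s : String) : Prop :=
  ((PySem.Str.split₀ s).all (fun t => t == "Z" || (PySem.Int.ofStr? t).isSome)) = true
instance (s : String) : Decidable (Pre_solution s) := by unfold Pre_solution; infer_instance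
def pvWitness_solution : String := "1 2 Z 3"
def Spec_solution (s : String) (out : Int) : Prop := out = solution_alt s
instance (s : String) (out : Int) : Decidable (Spec_solution s out) := by unfold Spec_solution; infer_instance

-- ===== CLAIM (what is proved, stated in full; the proofs are below) =====
def Claim_equal_solution : Prop := ∀ (s : String), Dom_solution s → Pre_solution s → Spec_solution s (solution s)

-- ===== LEMMAS AND PROOFS =====

-- surviving (skip count, total) of a token list, processed back to front (Nat skip for clean arithmetic)
def pvKT : List String → Nat × Int
  | [] => (0, 0)
  | tok :: rest =>
    let p := pvKT rest
    if tok == "Z" then (p.1 + 1, p.2)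
    else if p.1 > 0 then (p.1 - 1, p.2)
    else (p.1, p.2 + (PySem.Int.ofStr? tok).getD 0)

-- B's reverse foldl is the foldr computing pvKT (cast to Int in the first component)
theorem pvB_eq_KT (l : List String) :
    (l.reverse.foldl
      (fun (st : Int × Int) tok =>
        if tok == "Z" then (st.1 + 1, st.2)
        else
          let v := (PySem.Int.ofStr? tok).getD 0
          if st.1 > 0 then (st.1 - 1, st.2) else (st.1, st.2 + v))
      (0, 0)) = (((pvKT l).1 : Int), (pvKT l).2) := by
  rw [List.foldl_reverse]
  induction l with
  | nil => simp [pvKT]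
  | cons tok rest ih =>
    simp only [List.foldr_cons, ih, pvKT]
    by_cases hz : tok == "Z"
    · simp [hz]
    · simp only [hz, Bool.false_eq_true, if_false]
      by_cases hk : (pvKT rest).1 > 0
      · have : ((pvKT rest).1 : Int) > 0 := by exact_mod_cast hk
        simp [hk]
      · have : ¬ (((pvKT rest).1 : Int) > 0) := by exact_mod_cast hk
        simp [hk]

-- A's stack fold, started from any stack, sums to the survivors of the stack plus pvKT's total
theorem pvA_char (l : List String) (st : List Int) :
    (l.foldl
      (fun (stack : List Int) i =>
        if i == "Z" then stack.dropLast
        else stack ++ [(PySem.Int.ofStr? i).getD 0])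
      st).sum
    = (st.take (st.length - (pvKT l).1)).sum + (pvKT l).2 := by
  induction l generalizing st with
  | nil => simp [pvKT]
  | cons tok rest ih =>
    simp only [List.foldl_cons, pvKT]
    by_cases hz : tok == "Z"
    · simp only [hz, if_true]
      rw [ih]
      have h1 : st.dropLast = st.take (st.length - 1) := by
        rw [List.dropLast_eq_take]
      rw [h1, List.take_take, List.length_take]
      have h2 : min (min (st.length - 1) st.length - (pvKT rest).1) (st.length - 1)
          = st.length - ((pvKT rest).1 + 1) := by omega
      rw [h2]
    · simp only [hz, Bool.false_eq_true, if_false]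
      rw [ih]
      by_cases hk : (pvKT rest).1 > 0
      · simp only [hk, if_true]
        have hlen : st.length + 1 - (pvKT rest).1 ≤ st.length := by omega
        have h2 : (st ++ [(PySem.Int.ofStr? tok).getD 0]).length - (pvKT rest).1
            = st.length + 1 - (pvKT rest).1 := by simp
        rw [h2, List.take_append_of_le_length hlen]
        have h3 : st.length + 1 - (pvKT rest).1 = st.length - ((pvKT rest).1 - 1) := by omega
        rw [h3]
      · simp only [hk, if_false]
        have h0 : (pvKT rest).1 = 0 := by omega
        simp [h0]
        ring
    
-- ===== VERDICT (by name: the statement is the Claim_ definition above) =====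
theorem solution_spec : Claim_equal_solution := by
  intro s _ _
  unfold Spec_solution solution solution_alt
  rw [pvB_eq_KT, pvA_char]
  simp
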